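-- pv_equiv track=rewrite | github.com/TantoluwaHeritageA/30doc-day13 | main.py | pick_acryn
-- ===== SOURCE A (Python) =====
-- def pick_acryn(word):
--     acry = ''
--     space = ' '
--     output = []
--     for el in word:
--         if el.isalpha() or el == space:
--             acry += el
--     for i in acry.split(' '):
--         if i.isupper() and len(i) > 1:
--             output.append(i)
--     return output
-- ===== SOURCE B (Python) =====
-- def pick_acryn(word):
--     words = [''.join(c for c in chunk if c.isalpha()) for chunk in word.split(' ')]
--     return [w for w in words if w.isupper() and len(w) > 1]
-- ===== Notes on version B (the rewrite author's own statement) =====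
-- stated objective: simpler
-- what changed: B reverses A's two passes: instead of globally filtering the string to letters+spaces and then splitting, B splits on ' ' first and strips non-letters inside each chunk, expressed as two comprehensions with no accumulator loops.
import Mathlib
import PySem

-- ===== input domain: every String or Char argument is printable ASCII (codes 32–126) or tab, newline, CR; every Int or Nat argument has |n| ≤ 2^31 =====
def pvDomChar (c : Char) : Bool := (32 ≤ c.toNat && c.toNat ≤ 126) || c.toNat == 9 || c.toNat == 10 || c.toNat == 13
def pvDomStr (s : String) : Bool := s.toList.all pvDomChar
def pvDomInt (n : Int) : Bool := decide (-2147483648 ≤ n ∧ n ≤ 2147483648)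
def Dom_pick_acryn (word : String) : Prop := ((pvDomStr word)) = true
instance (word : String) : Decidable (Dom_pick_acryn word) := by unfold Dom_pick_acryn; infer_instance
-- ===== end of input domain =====

-- B splits on ' ' first and strips non-letters per chunk instead of A's global filter-then-split; simpler (two comprehensions, no accumulators).

-- Python str.isupper(): at least one cased character and no lowercase cased character.
-- Hand-ported (PySem has only the per-character isupper); exact on the ASCII domain, where
-- the cased characters are exactly 'a'-'z' and 'A'-'Z'.
def pyIsupperChars (cs : List Char) : Bool :=
  cs.any (fun c => PySem.Chars.isupper c || PySem.Chars.islower c) &&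
  cs.all (fun c => !PySem.Chars.islower c)

-- ===== PORT A =====
def pick_acryn (word : String) : List String :=
  (PySem.Chars.splitOn
      (word.toList.foldl
        (fun a el => if PySem.Chars.isalpha el || el == ' ' then a ++ [el] else a) [])  -- acry
      [' ']).foldl
    (fun output i =>
      if pyIsupperChars i && decide (1 < i.length) then output ++ [String.ofList i] else output) []

-- ===== PORT B =====
def pick_acryn_alt (word : String) : List String :=
  ((((PySem.Chars.splitOn word.toList [' ']).map
        (fun chunk => chunk.filter PySem.Chars.isalpha))  -- words
      ).filter (fun w => pyIsupperChars w && decide (1 < w.length))).map String.ofList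

-- ===== PRECONDITION & SPEC =====
def Spec_pick_acryn (word : String) (out : List String) : Prop := out = pick_acryn_alt word
instance (word : String) (out : List String) : Decidable (Spec_pick_acryn word out) := by unfold Spec_pick_acryn; infer_instance

-- ===== CLAIM (what is proved, stated in full; the proofs are below) =====
def Claim_equal_pick_acryn : Prop := ∀ (word : String), Dom_pick_acryn word → Spec_pick_acryn word (pick_acryn word)

-- ===== LEMMAS AND PROOFS =====

-- Simple structural single-space splitter used to reason about PySem.Chars.splitOn _ [' '].
def splitSp : List Char → List (List Char)
  | [] => [[]]
  | c :: rest =>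
    if c = ' ' then [] :: splitSp rest
    else (c :: (splitSp rest).headI) :: (splitSp rest).tail

lemma splitSp_ne_nil (cs : List Char) : splitSp cs ≠ [] := by
  cases cs with
  | nil => simp [splitSp]
  | cons c rest => simp only [splitSp]; split <;> simp

lemma go_eq (fuel : Nat) : ∀ (l cur : List Char) (acc : List (List Char)), l.length ≤ fuel →
    PySem.Chars.splitOn.go [' '] fuel l cur acc =
      acc.reverse ++ (cur.reverse ++ (splitSp l).headI) :: (splitSp l).tail := by
  induction fuel with
  | zero =>
    intro l cur acc h
    have : l = [] := List.length_eq_zero_iff.mp (by omega)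
    subst this
    simp [PySem.Chars.splitOn.go, splitSp]
  | succ fuel ih =>
    intro l cur acc h
    cases l with
    | nil => simp [PySem.Chars.splitOn.go, splitSp]
    | cons c rest =>
      by_cases hc : c = ' '
      · subst hc
        rw [PySem.Chars.splitOn.go, if_pos (by simp)]
        rw [show List.drop ([' '] : List Char).length (' ' :: rest) = rest from rfl]
        rw [ih rest [] _ (by simp at h; omega)]
        have hne := splitSp_ne_nil rest
        cases hsp : splitSp rest with
        | nil => exact absurd hsp hne
        | cons w ws => simp [splitSp, hsp]
      · rw [PySem.Chars.splitOn.go,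
            if_neg (by simp only [List.isPrefixOf, Bool.and_eq_true, beq_iff_eq]; exact fun h' => hc h'.1.symm)]
        rw [ih rest (c :: cur) acc (by simp at h; omega)]
        have hne := splitSp_ne_nil rest
        cases hsp : splitSp rest with
        | nil => exact absurd hsp hne
        | cons w ws => simp [splitSp, hsp, hc]

lemma splitOn_space (cs : List Char) : PySem.Chars.splitOn cs [' '] = splitSp cs := by
  rw [PySem.Chars.splitOn, go_eq (cs.length + 1) cs [] [] (by omega)]
  have hne := splitSp_ne_nil cs
  cases hsp : splitSp cs with
  | nil => exact absurd hsp hne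
  | cons w ws => simp

-- Filtering to letters+spaces before splitting on ' ' is the same as splitting first
-- and filtering each chunk to letters.
lemma splitSp_filter (cs : List Char) :
    splitSp (cs.filter (fun el => PySem.Chars.isalpha el || el == ' ')) =
      (splitSp cs).map (fun chunk => chunk.filter PySem.Chars.isalpha) := by
  induction cs with
  | nil => simp [splitSp]
  | cons c rest ih =>
    rw [List.filter_cons]
    by_cases hc : c = ' '
    · subst hc
      rw [if_pos (by decide)]
      simp [splitSp, ih]
    · by_cases ha : PySem.Chars.isalpha c = true
      · rw [if_pos (by simp [ha])]
        have hne := splitSp_ne_nil rest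
        cases hsp : splitSp rest with
        | nil => exact absurd hsp hne
        | cons w ws =>
          rw [hsp] at ih
          simp [splitSp, hc, ih, hsp, ha]
      · rw [if_neg (by simp [ha, hc])]
        have hne := splitSp_ne_nil rest
        cases hsp : splitSp rest with
        | nil => exact absurd hsp hne
        | cons w ws =>
          rw [hsp] at ih
          simp [splitSp, hc, ih, hsp, ha]

-- ===== VERDICT (by name: the statement is the Claim_ definition above) =====
theorem pick_acryn_spec : Claim_equal_pick_acryn := by
  intro word _
  unfold Spec_pick_acryn pick_acryn pick_acryn_alt
  rw [PySem.List.foldl_append_if (fun el => PySem.Chars.isalpha el || el == ' ') (fun el => el),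
      PySem.List.foldl_append_if (fun i => pyIsupperChars i && decide (1 < i.length)) String.ofList]
  simp only [List.nil_append, List.map_id']
  rw [splitOn_space, splitOn_space, splitSp_filter, List.filter_map]
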